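-- pv_equiv track=rewrite | github.com/mystor/mozilla-central | xpcom/idl-parser/xpidl/xpidl.py | paramAttlistToIDL
-- ===== SOURCE A (Python) =====
-- _paramsHardcode = {
--     2: ('array', 'shared', 'iid_is', 'size_is', 'retval'),
--     3: ('array', 'size_is', 'const'),
-- }
--
-- def paramAttlistToIDL(attlist):
--     if len(attlist) == 0:
--         return ''
--
--     # Hack alert: g_hash_table_foreach is pretty much unimitatable... hardcode
--     # quirk
--     attlist = list(attlist)
--     sorted = []
--     if len(attlist) in _paramsHardcode:
--         for p in _paramsHardcode[len(attlist)]: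
--             i = 0
--             while i < len(attlist):
--                 if attlist[i][0] == p:
--                     sorted.append(attlist[i])
--                     del attlist[i]
--                     continue
--
--                 i += 1
--
--     sorted.extend(attlist)
--
--     return '[%s] ' % ', '.join(["%s%s" % (name, value is not None and ' (%s)' % value or '')
--                                 for name, value, aloc in sorted])
-- ===== SOURCE B (Python) =====
-- _paramsHardcode = {
--     2: ('array', 'shared', 'iid_is', 'size_is', 'retval'),
--     3: ('array', 'size_is', 'const'),
-- }
--
-- def paramAttlistToIDL(attlist):
--     if len(attlist) == 0:
--         return ''
--
--     order = _paramsHardcode.get(len(attlist), ())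
--
--     def rank(t):
--         name = t[0]
--         return order.index(name) if name in order else len(order)
--
--     reordered = sorted(attlist, key=rank)
--
--     return '[%s] ' % ', '.join(["%s%s" % (name, value is not None and ' (%s)' % value or '')
--                                 for name, value, aloc in reordered])
-- ===== Notes on version B (the rewrite author's own statement) =====
-- stated objective: simpler
-- what changed: Replaced A's destructive per-name extraction (index/del surgery on a mutated copy, one while-loop per hardcoded name) by a single stable sort keyed by each attribute name's index in the hardcoded order, with sentinel len(order) for unranked names; the early return and the join formatting are unchanged.
import Mathlib
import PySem

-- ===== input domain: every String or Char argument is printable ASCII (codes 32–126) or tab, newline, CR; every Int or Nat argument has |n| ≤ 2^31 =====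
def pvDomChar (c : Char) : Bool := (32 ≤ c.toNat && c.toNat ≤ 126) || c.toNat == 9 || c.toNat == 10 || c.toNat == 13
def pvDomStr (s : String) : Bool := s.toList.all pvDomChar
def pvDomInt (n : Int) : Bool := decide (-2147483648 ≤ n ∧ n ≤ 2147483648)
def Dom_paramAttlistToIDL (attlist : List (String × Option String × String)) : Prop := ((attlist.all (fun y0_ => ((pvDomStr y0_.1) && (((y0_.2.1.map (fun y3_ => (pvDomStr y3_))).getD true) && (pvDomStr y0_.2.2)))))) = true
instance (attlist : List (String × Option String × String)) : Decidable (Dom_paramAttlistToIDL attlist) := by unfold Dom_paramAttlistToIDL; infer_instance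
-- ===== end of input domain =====

-- B replaces A's destructive per-name extraction loops by one stable sort keyed by the attribute
-- name's index in the hardcoded order (objective: simpler); the return values are proved equal.

-- ===== PORT A =====
-- the module constant _paramsHardcode, read as a lookup by length (shared by both ports)
def pvHardcode (n : Nat) : List String :=
  if n = 2 then ["array", "shared", "iid_is", "size_is", "retval"]
  else if n = 3 then ["array", "size_is", "const"]
  else []

-- one element of the join comprehension: "%s%s" % (name, value is not None and ' (%s)' % value or '')
-- (when value is not None, ' (%s)' % value is nonempty hence truthy; identical expression in A and in B)
def pvFmt (t : String × Option String × String) : String :=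
  t.1 ++ (match t.2.1 with
          | some v => " (" ++ v ++ ")"
          | none => "")

-- A's inner 'while i < len(attlist)' loop; 'del attlist[i]' at an in-range Nat index is eraseIdx (exact)
def pvWhile (p : String) (attlist sorted : List (String × Option String × String)) (i : Nat) :
    List (String × Option String × String) × List (String × Option String × String) :=
  if h : i < attlist.length then
    if attlist[i].1 = p then
      pvWhile p (attlist.eraseIdx i) (sorted ++ [attlist[i]]) i
    else
      pvWhile p attlist sorted (i + 1)
  else (attlist, sorted)
termination_by attlist.length - i
decreasing_by
  · simp [List.length_eraseIdx, h]; omega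
  · omega

def paramAttlistToIDL (attlist : List (String × Option String × String)) : String :=
  if attlist.length = 0 then "" else
    let st :=
      if attlist.length = 2 ∨ attlist.length = 3 then  -- len(attlist) in _paramsHardcode
        (pvHardcode attlist.length).foldl (fun st p => pvWhile p st.1 st.2 0) (attlist, [])
      else (attlist, [])
    "[" ++ PySem.Str.join ", " ((st.2 ++ st.1).map pvFmt) ++ "] "

-- ===== PORT B =====
-- rank(t): order.index(name) if name in order else len(order)
def pvRank (order : List String) (name : String) : Nat :=
  if order.contains name then (PySem.List.index? order name).getD order.length
  else order.length

def paramAttlistToIDL_alt (attlist : List (String × Option String × String)) : String :=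
  if attlist.length = 0 then "" else
    let order := pvHardcode attlist.length  -- _paramsHardcode.get(len(attlist), ())
    let reordered := PySem.List.sorted attlist (fun t => pvRank order t.1) false
    "[" ++ PySem.Str.join ", " (reordered.map pvFmt) ++ "] "

-- ===== PRECONDITION & SPEC =====
def Spec_paramAttlistToIDL (attlist : List (String × Option String × String)) (out : String) : Prop := out = paramAttlistToIDL_alt attlist
instance (attlist : List (String × Option String × String)) (out : String) : Decidable (Spec_paramAttlistToIDL attlist out) := by unfold Spec_paramAttlistToIDL; infer_instance

-- ===== CLAIM (what is proved, stated in full; the proofs are below) =====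
def Claim_equal_paramAttlistToIDL : Prop := ∀ (attlist : List (String × Option String × String)), Dom_paramAttlistToIDL attlist → Spec_paramAttlistToIDL attlist (paramAttlistToIDL attlist)

-- ===== LEMMAS AND PROOFS =====

-- A's while loop extracts, in input order, every tuple whose name is p, and removes them in place.
theorem pvWhile_spec (p : String) (l s : List (String × Option String × String)) (i : Nat) :
    pvWhile p l s i =
      (l.take i ++ (l.drop i).filter (fun t => !(t.1 == p)),
       s ++ (l.drop i).filter (fun t => t.1 == p)) := by
  induction l, s, i using pvWhile.induct p with
  | case1 l s i h hp ih =>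
    rw [pvWhile, dif_pos h, if_pos hp, ih]
    have hdrop : l.drop i = l[i] :: l.drop (i + 1) := List.drop_eq_getElem_cons h
    have htk : (l.eraseIdx i).take i = l.take i := by
      rw [List.eraseIdx_eq_take_drop_succ, List.take_append]
      simp [List.length_take, Nat.le_of_lt h]
    have hdr : (l.eraseIdx i).drop i = l.drop (i + 1) := by
      rw [List.eraseIdx_eq_take_drop_succ, List.drop_append]
      simp [List.length_take, Nat.le_of_lt h]
    have f1 : (l.drop i).filter (fun t => !(t.1 == p)) = (l.drop (i + 1)).filter (fun t => !(t.1 == p)) := by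
      rw [hdrop, List.filter_cons]
      simp [hp]
    have f2 : (l.drop i).filter (fun t => t.1 == p) = l[i] :: (l.drop (i + 1)).filter (fun t => t.1 == p) := by
      rw [hdrop, List.filter_cons]
      simp [hp]
    rw [htk, hdr, f1, f2]
    simp [List.append_assoc]
  | case2 l s i h hp ih =>
    rw [pvWhile, dif_pos h, if_neg hp, ih]
    have hdrop : l.drop i = l[i] :: l.drop (i + 1) := List.drop_eq_getElem_cons h
    have htk : l.take (i + 1) = l.take i ++ [l[i]] := by
      rw [List.take_add_one]
      simp [List.getElem?_eq_getElem h]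
    have f1 : (l.drop i).filter (fun t => !(t.1 == p)) = l[i] :: (l.drop (i + 1)).filter (fun t => !(t.1 == p)) := by
      rw [hdrop, List.filter_cons]
      simp [hp]
    have f2 : (l.drop i).filter (fun t => t.1 == p) = (l.drop (i + 1)).filter (fun t => t.1 == p) := by
      rw [hdrop, List.filter_cons]
      simp [hp]
    rw [f1, f2, htk, List.append_assoc]
    rfl
  | case3 l s i h =>
    rw [pvWhile, dif_neg h]
    have : l.drop i = [] := List.drop_eq_nil_of_le (Nat.le_of_not_lt h)
    simp [this, List.take_of_length_le (Nat.le_of_not_lt h)]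

theorem flatMap_congr' {α β : Type} (l : List α) (f g : α → List β)
    (h : ∀ x ∈ l, f x = g x) : l.flatMap f = l.flatMap g := by
  induction l with
  | nil => rfl
  | cons x t ih =>
    simp only [List.flatMap_cons, h x (by simp)]
    rw [ih (fun y hy => h y (by simp [hy]))]

-- A's outer loop over the (duplicate-free) hardcoded names groups the list name by name.
theorem pvFold_spec (ps : List String) (hnd : ps.Nodup) :
    ∀ (l s : List (String × Option String × String)),
      ps.foldl (fun st p => pvWhile p st.1 st.2 0) (l, s) =
        (l.filter (fun t => !(ps.contains t.1)),
         s ++ ps.flatMap (fun p => l.filter (fun t => t.1 == p))) := by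
  induction ps with
  | nil => intro l s; simp
  | cons p t ih =>
    intro l s
    rw [List.foldl_cons]
    have h0 : pvWhile p l s 0 = (l.filter (fun t => !(t.1 == p)), s ++ l.filter (fun t => t.1 == p)) := by
      rw [pvWhile_spec]; simp
    rw [h0, ih (List.nodup_cons.mp hnd).2]
    have hpnot : p ∉ t := (List.nodup_cons.mp hnd).1
    have h1 : ∀ q ∈ t, ((l.filter (fun x => !(x.1 == p))).filter (fun x => x.1 == q)) = l.filter (fun x => x.1 == q) := by
      intro q hq
      rw [List.filter_filter]
      apply List.filter_congr
      intro x _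
      by_cases hx : x.1 = q
      · have hqp : q ≠ p := fun h => hpnot (h ▸ hq)
        simp [hx, hqp]
      · simp [hx]
    have hflat : t.flatMap (fun q => (l.filter (fun x => !(x.1 == p))).filter (fun x => x.1 == q))
        = t.flatMap (fun q => l.filter (fun x => x.1 == q)) := flatMap_congr' t _ _ h1
    have h2 : (l.filter (fun x => !(x.1 == p))).filter (fun x => !(t.contains x.1))
        = l.filter (fun x => !((p :: t).contains x.1)) := by
      rw [List.filter_filter]
      apply List.filter_congr
      intro x _
      by_cases hxp : x.1 = p
      · simp [hxp]
      · by_cases hxt : x.1 ∈ t <;> simp [hxp, hxt]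
    rw [hflat, h2, List.flatMap_cons, List.append_assoc]

theorem insertBy_prefix_skip {α : Type} (b : α → α → Bool) (x : α) (ys zs : List α)
    (h : ∀ y ∈ ys, b x y = false) :
    PySem.List.insertBy b x (ys ++ zs) = ys ++ PySem.List.insertBy b x zs := by
  induction ys with
  | nil => simp
  | cons y ys ih =>
    simp only [List.cons_append, PySem.List.insertBy, h y (by simp)]
    simp only [Bool.false_eq_true, if_false, List.cons.injEq, true_and]
    exact ih (fun y hy => h y (by simp [hy]))

theorem insertBy_front {α : Type} (b : α → α → Bool) (x : α) (ys : List α)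
    (h : ∀ y ∈ ys, b x y = true) :
    PySem.List.insertBy b x ys = x :: ys := by
  cases ys with
  | nil => simp [PySem.List.insertBy]
  | cons y ys => simp [PySem.List.insertBy, h y (by simp)]

theorem insertBy_congr {α : Type} (b1 b2 : α → α → Bool) (x : α) (ys : List α)
    (h : ∀ y ∈ ys, b1 x y = b2 x y) :
    PySem.List.insertBy b1 x ys = PySem.List.insertBy b2 x ys := by
  induction ys with
  | nil => rfl
  | cons y ys ih =>
    simp only [PySem.List.insertBy, h y (by simp)]
    rw [ih (fun y hy => h y (by simp [hy]))]

theorem sorted_append_singleton {α : Type} (l : List α) (x : α) (key : α → Nat) :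
    PySem.List.sorted (l ++ [x]) key false =
      PySem.List.insertBy (fun a b => decide (key a < key b)) x (PySem.List.sorted l key false) := by
  rw [PySem.List.sorted_eq_foldl_insertBy, PySem.List.sorted_eq_foldl_insertBy, List.foldl_append]
  rfl

-- stability: the key-0 class comes first in input order, the rest are sorted by the unshifted key
theorem sorted_shift {α : Type} (l : List α) (P : α → Bool) (key : α → Nat) :
    PySem.List.sorted l (fun x => if P x then 0 else key x + 1) false =
      l.filter P ++ PySem.List.sorted (l.filter (fun x => !P x)) key false := by
  induction l using List.reverseRecOn with
  | nil => simp [PySem.List.sorted_eq_foldl_insertBy]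
  | append_singleton l x ih =>
    rw [sorted_append_singleton, ih]
    by_cases hP : P x = true
    · rw [insertBy_prefix_skip _ _ _ _ (by
        intro y hy
        have : P y = true := (List.mem_filter.mp hy).2
        simp [hP, this])]
      rw [insertBy_front _ _ _ (by
        intro y hy
        have hy' : y ∈ l.filter (fun x => !P x) := (PySem.List.mem_sorted _ _ _ _).mp hy
        have : P y = false := by simpa using (List.mem_filter.mp hy').2
        simp [hP, this])]
      simp [List.filter_append, hP]
    · have hP' : P x = false := by simpa using hP
      rw [insertBy_prefix_skip _ _ _ _ (by
        intro y hy
        have : P y = true := (List.mem_filter.mp hy).2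
        simp [hP', this])]
      rw [insertBy_congr _ (fun a b => decide (key a < key b)) _ _ (by
        intro y hy
        have hy' : y ∈ l.filter (fun x => !P x) := (PySem.List.mem_sorted _ _ _ _).mp hy
        have : P y = false := by simpa using (List.mem_filter.mp hy').2
        simp [hP', this])]
      rw [← sorted_append_singleton]
      simp [List.filter_append, hP']

theorem pvRank_nil (name : String) : pvRank [] name = 0 := by
  simp [pvRank]

theorem pvRank_cons (p : String) (t : List String) (name : String) :
    pvRank (p :: t) name = if name = p then 0 else pvRank t name + 1 := by
  by_cases hp : name = p
  · subst hp
    rw [pvRank, if_pos (by simp), PySem.List.index?_cons_self, if_pos rfl]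
    rfl
  · have hne : p ≠ name := fun h => hp h.symm
    rw [pvRank, pvRank, PySem.List.index?_cons_of_ne t hne, if_neg hp]
    have hc : (p :: t).contains name = t.contains name := by
      simp [hp]
    by_cases hm : t.contains name = true
    · have : (PySem.List.index? t name).isSome := by
        rw [PySem.List.index?_isSome_iff]; simpa using hm
      obtain ⟨k, hk⟩ := Option.isSome_iff_exists.mp this
      rw [hc, if_pos hm, if_pos hm, hk]
      rfl
    · have hm' : t.contains name = false := by simpa using hm
      have hnone : PySem.List.index? t name = none := by
        rw [PySem.List.index?_eq_none_iff]; simpa using hm'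
      rw [hnone, hc, if_neg (by rw [hm']; simp), if_neg (by rw [hm']; simp)]
      rfl

-- the stable sort by rank groups the list exactly as A's extraction loops do
theorem sorted_groups (order : List String) (hnd : order.Nodup)
    (l : List (String × Option String × String)) :
    PySem.List.sorted l (fun t => pvRank order t.1) false =
      order.flatMap (fun p => l.filter (fun t => t.1 == p)) ++
        l.filter (fun t => !(order.contains t.1)) := by
  induction order generalizing l with
  | nil =>
    have : PySem.List.sorted l (fun t => pvRank [] t.1) false = l := by
      apply PySem.List.sorted_eq_self_of_pairwise
      induction l with
      | nil => exact List.Pairwise.nil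
      | cons x t ih => exact List.Pairwise.cons (fun y _ => by simp [pvRank_nil]) ih
    simp [this]
  | cons p t ih =>
    have hkey : (fun x : String × Option String × String => pvRank (p :: t) x.1)
        = (fun x => if (x.1 == p) then 0 else (fun y : String × Option String × String => pvRank t y.1) x + 1) := by
      funext x
      rw [pvRank_cons]
      by_cases h : x.1 = p <;> simp [h]
    rw [hkey, sorted_shift]
    have hpnot : p ∉ t := (List.nodup_cons.mp hnd).1
    rw [ih (List.nodup_cons.mp hnd).2]
    rw [List.flatMap_cons]
    have h1 : ∀ q ∈ t, ((l.filter (fun x => !(x.1 == p))).filter (fun x => x.1 == q)) = l.filter (fun x => x.1 == q) := by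
      intro q hq
      rw [List.filter_filter]
      apply List.filter_congr
      intro x _
      by_cases hx : x.1 = q
      · have hqp : q ≠ p := fun h => hpnot (h ▸ hq)
        simp [hx, hqp]
      · simp [hx]
    rw [flatMap_congr' t _ _ h1]
    have h2 : (l.filter (fun x => !(x.1 == p))).filter (fun x => !(t.contains x.1))
        = l.filter (fun x => !((p :: t).contains x.1)) := by
      rw [List.filter_filter]
      apply List.filter_congr
      intro x _
      by_cases hxp : x.1 = p
      · simp [hxp]
      · by_cases hxt : x.1 ∈ t <;> simp [hxp, hxt]
    rw [h2]
    simp [List.append_assoc]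

theorem pvHardcode_nodup (n : Nat) : (pvHardcode n).Nodup := by
  unfold pvHardcode
  split_ifs <;> decide

-- ===== VERDICT (by name: the statement is the Claim_ definition above) =====
theorem paramAttlistToIDL_spec : Claim_equal_paramAttlistToIDL := by
  unfold Claim_equal_paramAttlistToIDL
  intro attlist _
  unfold Spec_paramAttlistToIDL
  rw [paramAttlistToIDL, paramAttlistToIDL_alt]
  by_cases h0 : attlist.length = 0
  · rw [if_pos h0, if_pos h0]
  · rw [if_neg h0, if_neg h0]
    have key : (if attlist.length = 2 ∨ attlist.length = 3 then
          (pvHardcode attlist.length).foldl (fun st p => pvWhile p st.1 st.2 0) (attlist, [])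
        else (attlist, [])).2 ++
        (if attlist.length = 2 ∨ attlist.length = 3 then
          (pvHardcode attlist.length).foldl (fun st p => pvWhile p st.1 st.2 0) (attlist, [])
        else (attlist, [])).1
        = PySem.List.sorted attlist (fun t => pvRank (pvHardcode attlist.length) t.1) false := by
      by_cases h23 : attlist.length = 2 ∨ attlist.length = 3
      · rw [if_pos h23, pvFold_spec _ (pvHardcode_nodup _),
          sorted_groups _ (pvHardcode_nodup _)]
        simp
      · have horder : pvHardcode attlist.length = [] := by
          rcases not_or.mp h23 with ⟨h2, h3⟩
          unfold pvHardcode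
          rw [if_neg h2, if_neg h3]
        rw [if_neg h23, horder, sorted_groups [] List.nodup_nil]
        simp
    exact congrArg (fun z => "[" ++ PySem.Str.join ", " (List.map pvFmt z) ++ "] ") key
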